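-- pv_equiv track=rewrite | github.com/s2e-lab/seneca | paper-scripts/scripts/inspect_mismatches.py | compute_slice
-- ===== SOURCE A (Python) =====
-- def compute_slice(call_graph, edge):
--     # slice computation initialization
--     cg_slice = set()
--     cg_slice.add(edge)
--     prior_nodes = call_graph.get(edge[0], set())
--     visited_edges = set(edge)  # keeps track of visited edges, in case of (mutual-)recursion.
--     while len(prior_nodes) > 0:
--         current_prior_edges = set()
--         for prior_edge in prior_nodes:
--             if prior_edge not in visited_edges:
--                 cg_slice.add(prior_edge)
--                 visited_edges.add(prior_edge)
--                 current_prior_edges = current_prior_edges.union(call_graph.get(prior_edge[0], set()))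
--         prior_nodes = current_prior_edges
--     return cg_slice
-- ===== SOURCE B (Python) =====
-- def compute_slice(call_graph, edge):
--     # Kleene-style naive fixed-point iteration: repeatedly rescan the whole
--     # slice, appending any missing predecessor edges, until a full pass over
--     # the slice adds nothing; no visited set and no frontier/queue is kept.
--     result = [edge]
--     changed = True
--     while changed:
--         changed = False
--         for e in list(result):
--             for p in call_graph.get(e[0], ()):
--                 if p not in result:
--                     result.append(p)
--                     changed = True
--     return set(result)
-- ===== Notes on version B (the rewrite author's own statement) =====
-- stated objective: simpler
-- what changed: Replaces the visited-set + level-batched frontier BFS by a Kleene-style naive fixed-point iteration: no visited set and no frontier/queue at all, just repeated full rescans of the growing slice list appending missing predecessor edges until a pass adds nothing.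
import Mathlib
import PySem

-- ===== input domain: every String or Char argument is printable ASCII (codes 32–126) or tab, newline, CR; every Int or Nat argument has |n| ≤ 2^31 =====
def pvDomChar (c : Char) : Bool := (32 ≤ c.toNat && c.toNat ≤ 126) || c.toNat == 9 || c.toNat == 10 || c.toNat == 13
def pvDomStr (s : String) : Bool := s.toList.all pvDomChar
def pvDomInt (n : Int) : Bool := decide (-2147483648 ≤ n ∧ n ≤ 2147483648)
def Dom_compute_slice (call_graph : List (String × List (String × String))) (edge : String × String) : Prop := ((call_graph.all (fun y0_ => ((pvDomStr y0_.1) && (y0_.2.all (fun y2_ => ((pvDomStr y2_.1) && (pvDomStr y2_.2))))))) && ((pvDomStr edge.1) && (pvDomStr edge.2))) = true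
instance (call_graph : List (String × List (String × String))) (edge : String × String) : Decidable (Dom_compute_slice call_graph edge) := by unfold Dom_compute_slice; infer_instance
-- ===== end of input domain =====

-- B replaces A's visited-set + level-batched frontier BFS by a Kleene-style naive fixed-point
-- iteration (repeated full rescans of the growing slice until a pass adds nothing); objective:
-- simpler bookkeeping, no visited set and no frontier/queue. Return-value equivalence only.

-- shared primitive: call_graph.get(key, set()) — dict lookup with default (PySem.Dict semantics)
def pvPreds (call_graph : List (String × List (String × String))) (key : String) : List (String × String) :=
  PySem.Dict.getD (PySem.Dict.mk call_graph) key []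

-- fuel bookkeeping (totality device only; provably sufficient — see the lemmas below the claim):
-- pvE = the distinct edges occurring in call_graph's values, pvUnvis v = how many are not in v
def pvE (call_graph : List (String × List (String × String))) : List (String × String) :=
  PySem.Set.ofList (call_graph.flatMap Prod.snd)
def pvUnvis (call_graph : List (String × List (String × String))) (v : List (String × String)) : Nat :=
  ((pvE call_graph).filter (fun y => decide (y ∉ v))).length

-- ===== PORT A =====
-- the body of A's 'for prior_edge in prior_nodes' loop (state: cg_slice, visited_edges, current_prior_edges)
def pvLevelA (call_graph : List (String × List (String × String))) :
    List (String × String) → List (String × String) → List (String × String) → List (String × String) →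
    List (String × String) × List (String × String) × List (String × String)
  | s, v, acc, [] => (s, v, acc)
  | s, v, acc, x :: f =>
    if x ∈ v then pvLevelA call_graph s v acc f
    else pvLevelA call_graph (PySem.Set.add s x) (PySem.Set.add v x)
           (PySem.Set.union acc (pvPreds call_graph x.1)) f

-- A's 'while len(prior_nodes) > 0' loop, with fuel (one unit per level; the entry fuel provably suffices)
def pvLoopA (call_graph : List (String × List (String × String))) :
    Nat → List (String × String) → List (String × String) → List (String × String) → List (String × String)
  | 0, s, _, _ => s
  | Nat.succ k, s, v, f =>
    if f = [] then s
    else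
      match pvLevelA call_graph s v [] f with
      | (s', v', n) => pvLoopA call_graph k s' v' n

def compute_slice (call_graph : List (String × List (String × String))) (edge : String × String) : List (String × String) :=
  -- cg_slice = set(); cg_slice.add(edge)
  let cg_slice := PySem.Set.add PySem.Set.empty edge
  let prior_nodes := pvPreds call_graph edge.1
  -- visited_edges = set(edge) holds only edge's two component STRINGS; a string never equals an edge
  -- tuple, so as a set of edges it is exactly empty (exact port of the membership tests)
  pvLoopA call_graph (pvUnvis call_graph PySem.Set.empty + 2) cg_slice PySem.Set.empty prior_nodes

-- ===== PORT B =====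
-- B's inner loop: for p in call_graph.get(e[0], ()): if p not in result: result.append(p); changed = True
def pvFixInner (st : List (String × String) × Bool) (ps : List (String × String)) :
    List (String × String) × Bool :=
  ps.foldl (fun st p => if p ∈ st.1 then st else (st.1 ++ [p], true)) st

-- one full pass 'for e in list(result)' over the snapshot of result taken at pass start
def pvFixPass (call_graph : List (String × List (String × String))) (snap : List (String × String))
    (st : List (String × String) × Bool) : List (String × String) × Bool :=
  snap.foldl (fun st e => pvFixInner st (pvPreds call_graph e.1)) st

-- B's 'while changed' loop, with fuel (one unit per pass; the entry fuel provably suffices)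
def pvFixLoop (call_graph : List (String × List (String × String))) :
    Nat → List (String × String) → List (String × String)
  | 0, r => r
  | Nat.succ k, r =>
    let st := pvFixPass call_graph r (r, false)
    if st.2 then pvFixLoop call_graph k st.1 else st.1

def compute_slice_alt (call_graph : List (String × List (String × String))) (edge : String × String) : List (String × String) :=
  -- result = [edge]; while changed: one rescan pass; return set(result)
  PySem.Set.ofList (pvFixLoop call_graph (pvUnvis call_graph PySem.Set.empty + 2) [edge])

-- ===== PRECONDITION & SPEC =====
def Spec_compute_slice (call_graph : List (String × List (String × String))) (edge : String × String) (out : List (String × String)) : Prop := out = compute_slice_alt call_graph edge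
instance (call_graph : List (String × List (String × String))) (edge : String × String) (out : List (String × String)) : Decidable (Spec_compute_slice call_graph edge out) := by unfold Spec_compute_slice; infer_instance

-- ===== CLAIM (what is proved, stated in full; the proofs are below) =====
def Claim_equal_compute_slice : Prop := ∀ (call_graph : List (String × List (String × String))) (edge : String × String), Dom_compute_slice call_graph edge → Spec_compute_slice call_graph edge (compute_slice call_graph edge)

-- ===== LEMMAS AND PROOFS =====

-- abbreviation: A's loop run with its sufficient fuel
def pvRunA (cg : List (String × List (String × String))) (s v f : List (String × String)) : List (String × String) :=
  pvLoopA cg (pvUnvis cg v + 2) s v f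
-- abbreviation: B's loop run with a sufficient fuel
def pvFixRun (cg : List (String × List (String × String))) (r : List (String × String)) : List (String × String) :=
  pvFixLoop cg (pvUnvis cg r + 1) r

-- every frontier element is an edge of the graph
def pvQOK (cg : List (String × List (String × String))) (q : List (String × String)) : Prop :=
  ∀ x ∈ q, x ∈ pvE cg

-- flat predecessor stream of a batch of edges
def pvFP (cg : List (String × List (String × String))) (l : List (String × String)) : List (String × String) :=
  l.flatMap (fun e => pvPreds cg e.1)

-- canonical "new elements" of a stream relative to an accumulating base:
-- drop elements already in the base and later duplicates
def pvCanon (w : List (String × String)) : List (String × String) → List (String × String)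
  | [] => []
  | x :: l => if x ∈ w then pvCanon w l else x :: pvCanon (w ++ [x]) l

-- proof-side concat variant of A's level body (accumulates predecessors by plain append)
def pvStepC (cg : List (String × List (String × String))) :
    List (String × String) → List (String × String) → List (String × String) → List (String × String) →
    List (String × String) × List (String × String) × List (String × String)
  | s, v, c, [] => (s, v, c)
  | s, v, c, x :: f =>
    if x ∈ v then pvStepC cg s v c f
    else pvStepC cg (PySem.Set.add s x) (PySem.Set.add v x) (c ++ pvPreds cg x.1) f

lemma pvPreds_cons (cg : List (String × List (String × String))) (k : String)
    (vl : List (String × String)) (a : String) :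
    pvPreds ((k, vl) :: cg) a = if k == a then vl else pvPreds cg a := by
  simp only [pvPreds, PySem.Dict.getD_eq_get?_getD, PySem.Dict.get?_mk_cons]
  split <;> rfl

lemma pvPreds_sub (cg : List (String × List (String × String))) (a : String) :
    ∀ x ∈ pvPreds cg a, x ∈ pvE cg := by
  induction cg with
  | nil => intro x hx; cases hx
  | cons p cg ih =>
    obtain ⟨k, vl⟩ := p
    intro x hx
    rw [pvPreds_cons] at hx
    simp only [pvE, PySem.Set.mem_ofList, List.flatMap_cons, List.mem_append]
    by_cases hk : (k == a) = true
    · rw [if_pos hk] at hx; exact Or.inl hx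
    · rw [if_neg hk] at hx
      have := ih x hx
      simp only [pvE, PySem.Set.mem_ofList] at this
      exact Or.inr this

lemma pvFP_sub (cg : List (String × List (String × String))) (l : List (String × String)) :
    ∀ x ∈ pvFP cg l, x ∈ pvE cg := by
  intro x hx
  rw [pvFP, List.mem_flatMap] at hx
  obtain ⟨e, _, hx⟩ := hx
  exact pvPreds_sub cg e.1 x hx

lemma pvFilter_lt {α : Type} (l : List α) (p : α → Bool) (x : α) (hx : x ∈ l) (hp : ¬ p x = true) :
    (List.filter p l).length < l.length := by
  induction l with
  | nil => cases hx
  | cons y l ih =>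
    rw [List.mem_cons] at hx
    by_cases hy : p y = true
    · have hx' : x ∈ l := by
        rcases hx with rfl | h
        · exact absurd hy hp
        · exact h
      have h1 := ih hx'
      have h2 : List.filter p (y :: l) = y :: List.filter p l := by simp [hy]
      rw [h2, List.length_cons, List.length_cons]; omega
    · have h2 : List.filter p (y :: l) = List.filter p l := by simp [hy]
      rw [h2, List.length_cons]
      have := List.length_filter_le p l; omega

lemma pvUnvis_filter_add (cg : List (String × List (String × String))) (v : List (String × String))
    (x : String × String) :
    (pvE cg).filter (fun y => decide (y ∉ PySem.Set.add v x)) =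
      ((pvE cg).filter (fun y => decide (y ∉ v))).filter (fun y => decide (y ≠ x)) := by
  rw [List.filter_filter]
  apply List.filter_congr
  intro y _
  by_cases h1 : y ∈ v <;> by_cases h2 : y = x <;> simp [PySem.Set.mem_add, h1, h2]

lemma pvUnvis_add_lt (cg : List (String × List (String × String))) (v : List (String × String))
    (x : String × String) (hxE : x ∈ pvE cg) (hxv : x ∉ v) :
    pvUnvis cg (PySem.Set.add v x) < pvUnvis cg v := by
  unfold pvUnvis
  rw [pvUnvis_filter_add]
  apply pvFilter_lt _ _ x
  · simp [List.mem_filter, hxE, hxv]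
  · simp

lemma pvUnvis_mono (cg : List (String × List (String × String))) (s t : List (String × String))
    (hst : ∀ y ∈ s, y ∈ t) : pvUnvis cg t ≤ pvUnvis cg s := by
  unfold pvUnvis
  have h : (pvE cg).filter (fun y => decide (y ∉ t)) =
      ((pvE cg).filter (fun y => decide (y ∉ s))).filter (fun y => decide (y ∉ t)) := by
    rw [List.filter_filter]
    apply List.filter_congr
    intro y _
    by_cases h1 : y ∈ t
    · simp [h1]
    · have h2 : y ∉ s := fun hy => h1 (hst y hy)
      simp [h1, h2]
  rw [h]
  exact List.length_filter_le _ _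

lemma pvUnvis_append_lt (cg : List (String × List (String × String))) (s C : List (String × String))
    (x : String × String) (hxC : x ∈ C) (hxE : x ∈ pvE cg) (hxs : x ∉ s) :
    pvUnvis cg (s ++ C) < pvUnvis cg s := by
  have h1 : pvUnvis cg (s ++ C) ≤ pvUnvis cg (PySem.Set.add s x) := by
    apply pvUnvis_mono
    intro y hy
    rw [PySem.Set.mem_add] at hy
    rcases hy with hy | rfl
    · exact List.mem_append.mpr (Or.inl hy)
    · exact List.mem_append.mpr (Or.inr hxC)
  have h2 := pvUnvis_add_lt cg s x hxE hxs
  omega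

lemma pvSetAdd_of_not_mem (s : List (String × String)) (x : String × String) (hx : x ∉ s) :
    PySem.Set.add s x = s ++ [x] := by
  simp [PySem.Set.add, PySem.Set.contains, hx]

lemma pvSetAdd_of_mem (s : List (String × String)) (x : String × String) (hx : x ∈ s) :
    PySem.Set.add s x = s := by
  simp [PySem.Set.add, PySem.Set.contains, hx]

-- ===== pvCanon toolbox =====

lemma pvCanon_cons (w : List (String × String)) (x : String × String) (l : List (String × String)) :
    pvCanon w (x :: l) = if x ∈ w then pvCanon w l else x :: pvCanon (w ++ [x]) l := rfl

lemma pvCanon_mem_iff (l : List (String × String)) :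
    ∀ (w : List (String × String)) (y : String × String),
      y ∈ pvCanon w l ↔ (y ∈ l ∧ y ∉ w) := by
  induction l with
  | nil => intro w y; simp [pvCanon]
  | cons x l ih =>
    intro w y
    rw [pvCanon_cons]
    by_cases hx : x ∈ w
    · rw [if_pos hx, ih]
      constructor
      · rintro ⟨h1, h2⟩; exact ⟨List.mem_cons_of_mem _ h1, h2⟩
      · rintro ⟨h1, h2⟩
        rcases List.mem_cons.mp h1 with rfl | h1
        · exact absurd hx h2
        · exact ⟨h1, h2⟩
    · rw [if_neg hx]
      constructor
      · intro h
        rcases List.mem_cons.mp h with rfl | h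
        · exact ⟨List.mem_cons_self, hx⟩
        · obtain ⟨h1, h2⟩ := (ih _ y).mp h
          refine ⟨List.mem_cons_of_mem _ h1, fun hy => h2 ?_⟩
          exact List.mem_append.mpr (Or.inl hy)
      · rintro ⟨h1, h2⟩
        rcases List.mem_cons.mp h1 with rfl | h1
        · exact List.mem_cons_self
        · by_cases hyx : y = x
          · subst hyx; exact List.mem_cons_self
          · apply List.mem_cons_of_mem
            apply (ih _ y).mpr
            refine ⟨h1, fun hy => ?_⟩
            rcases List.mem_append.mp hy with h | h
            · exact h2 h
            · exact hyx (List.mem_singleton.mp h)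

lemma pvCanon_nodup (l : List (String × String)) :
    ∀ (w : List (String × String)), (pvCanon w l).Nodup := by
  induction l with
  | nil => intro w; simp [pvCanon]
  | cons x l ih =>
    intro w
    rw [pvCanon_cons]
    split
    · exact ih w
    · rw [List.nodup_cons]
      refine ⟨fun hx => ?_, ih _⟩
      have := (pvCanon_mem_iff l _ x).mp hx
      exact this.2 (List.mem_append.mpr (Or.inr (List.mem_singleton.mpr rfl)))

lemma pvCanon_eq_nil_iff (l : List (String × String)) :
    ∀ (w : List (String × String)), pvCanon w l = [] ↔ ∀ y ∈ l, y ∈ w := by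
  induction l with
  | nil => intro w; simp [pvCanon]
  | cons x l ih =>
    intro w
    rw [pvCanon_cons]
    by_cases hx : x ∈ w
    · rw [if_pos hx, ih]
      constructor
      · intro h y hy
        rcases List.mem_cons.mp hy with rfl | hy
        · exact hx
        · exact h y hy
      · intro h y hy; exact h y (List.mem_cons_of_mem _ hy)
    · rw [if_neg hx]
      simp only [List.cons_ne_nil, false_iff]
      intro h
      exact hx (h x List.mem_cons_self)

lemma pvCanon_append (a : List (String × String)) :
    ∀ (w b : List (String × String)),
      pvCanon w (a ++ b) = pvCanon w a ++ pvCanon (w ++ pvCanon w a) b := by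
  induction a with
  | nil => intro w b; simp [pvCanon]
  | cons x a ih =>
    intro w b
    rw [List.cons_append, pvCanon_cons, pvCanon_cons]
    by_cases hx : x ∈ w
    · rw [if_pos hx, if_pos hx, ih]
    · rw [if_neg hx, if_neg hx, List.cons_append, ih (w ++ [x]) b]
      have : (w ++ [x]) ++ pvCanon (w ++ [x]) a = w ++ (x :: pvCanon (w ++ [x]) a) := by
        rw [List.append_assoc]; rfl
      rw [this]

lemma pvCanon_dropPrefix (a : List (String × String)) :
    ∀ (w b : List (String × String)), (∀ y ∈ a, y ∈ w) →
      pvCanon w (a ++ b) = pvCanon w b := by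
  induction a with
  | nil => intro w b _; rfl
  | cons x a ih =>
    intro w b h
    rw [List.cons_append]
    rw [pvCanon_cons]
    rw [if_pos (h x List.mem_cons_self)]
    exact ih w b (fun y hy => h y (List.mem_cons_of_mem _ hy))

lemma pvCanon_absorb (l : List (String × String)) :
    ∀ (w : List (String × String)), ∀ y ∈ l, y ∈ w ++ pvCanon w l := by
  induction l with
  | nil => intro w y hy; cases hy
  | cons x l ih =>
    intro w y hy
    rw [pvCanon_cons]
    by_cases hx : x ∈ w
    · rw [if_pos hx]
      rcases List.mem_cons.mp hy with rfl | hy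
      · exact List.mem_append.mpr (Or.inl hx)
      · exact ih w y hy
    · rw [if_neg hx]
      rcases List.mem_cons.mp hy with rfl | hy
      · exact List.mem_append.mpr (Or.inr List.mem_cons_self)
      · have := ih (w ++ [x]) y hy
        rcases List.mem_append.mp this with h | h
        · rcases List.mem_append.mp h with h | h
          · exact List.mem_append.mpr (Or.inl h)
          · exact List.mem_append.mpr (Or.inr (by
              rw [List.mem_singleton.mp h]; exact List.mem_cons_self))
        · exact List.mem_append.mpr (Or.inr (List.mem_cons_of_mem _ h))

lemma pvCanon_sub (l : List (String × String)) :
    ∀ (v w : List (String × String)), (∀ y ∈ v, y ∈ w) →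
      pvCanon w (pvCanon v l) = pvCanon w l := by
  induction l with
  | nil => intro v w _; rfl
  | cons x l ih =>
    intro v w hvw
    by_cases hxv : x ∈ v
    · rw [show pvCanon v (x :: l) = pvCanon v l from by rw [pvCanon_cons, if_pos hxv],
        ih v w hvw, pvCanon_cons, if_pos (hvw x hxv)]
    · rw [show pvCanon v (x :: l) = x :: pvCanon (v ++ [x]) l from by rw [pvCanon_cons, if_neg hxv]]
      by_cases hxw : x ∈ w
      · rw [show pvCanon w (x :: pvCanon (v ++ [x]) l) = pvCanon w (pvCanon (v ++ [x]) l) from by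
          rw [pvCanon_cons, if_pos hxw]]
        rw [ih (v ++ [x]) w (fun y hy => by
          rcases List.mem_append.mp hy with h | h
          · exact hvw y h
          · rw [List.mem_singleton.mp h]; exact hxw)]
        rw [pvCanon_cons, if_pos hxw]
      · rw [show pvCanon w (x :: pvCanon (v ++ [x]) l) =
            x :: pvCanon (w ++ [x]) (pvCanon (v ++ [x]) l) from by rw [pvCanon_cons, if_neg hxw]]
        rw [ih (v ++ [x]) (w ++ [x]) (fun y hy => by
          rcases List.mem_append.mp hy with h | h
          · exact List.mem_append.mpr (Or.inl (hvw y h))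
          · exact List.mem_append.mpr (Or.inr h))]
        rw [pvCanon_cons, if_neg hxw]

lemma pvDiscard_eq_filter (l : List (String × String)) (x : String × String) :
    PySem.Set.discard l x = l.filter (fun y => y != x) := rfl

lemma pvCanon_discard (x : String × String) :
    ∀ (l v : List (String × String)), x ∈ v → pvCanon v (PySem.Set.discard l x) = pvCanon v l := by
  intro l
  induction l with
  | nil => intro v _; rfl
  | cons y l ih =>
    intro v hv
    rw [pvDiscard_eq_filter, List.filter_cons]
    by_cases hyx : y = x
    · subst hyx
      rw [if_neg (by simp), ← pvDiscard_eq_filter, ih v hv, pvCanon_cons, if_pos hv]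
    · have hb : (y != x) = true := by simp [hyx]
      rw [if_pos hb, ← pvDiscard_eq_filter, pvCanon_cons, pvCanon_cons]
      by_cases hyv : y ∈ v
      · rw [if_pos hyv, if_pos hyv, ih v hv]
      · rw [if_neg hyv, if_neg hyv, ih _ (List.mem_append.mpr (Or.inl hv))]

lemma pvCanon_ofList : ∀ (q v : List (String × String)), pvCanon v (PySem.Set.ofList q) = pvCanon v q := by
  intro q
  induction q with
  | nil => intro v; rfl
  | cons x q ih =>
    intro v
    rw [PySem.Set.ofList_cons]
    show pvCanon v (x :: PySem.Set.discard (PySem.Set.ofList q) x) = pvCanon v (x :: q)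
    rw [pvCanon_cons, pvCanon_cons]
    by_cases hv : x ∈ v
    · rw [if_pos hv, if_pos hv, pvCanon_discard x _ _ hv, ih]
    · rw [if_neg hv, if_neg hv,
        pvCanon_discard x _ _ (List.mem_append.mpr (Or.inr (List.mem_singleton.mpr rfl))), ih]

-- dropping already-present elements from a batch does not change the canon of its predecessor
-- stream, provided the dropped elements' predecessors are already in the base
lemma pvCanon_fp_drop (cg : List (String × List (String × String))) (l : List (String × String)) :
    ∀ (s w : List (String × String)),
      (∀ y ∈ l, y ∈ s → ∀ p ∈ pvPreds cg y.1, p ∈ w) →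
      pvCanon w (pvFP cg (pvCanon s l)) = pvCanon w (pvFP cg l) := by
  induction l with
  | nil => intro s w _; rfl
  | cons x l ih =>
    intro s w h
    have hfp : pvFP cg (x :: l) = pvPreds cg x.1 ++ pvFP cg l := by simp [pvFP]
    by_cases hx : x ∈ s
    · rw [show pvCanon s (x :: l) = pvCanon s l from by rw [pvCanon_cons]; rw [if_pos hx], hfp,
        pvCanon_dropPrefix _ _ _ (h x List.mem_cons_self hx)]
      exact ih s w (fun y hy => h y (List.mem_cons_of_mem _ hy))
    · rw [show pvCanon s (x :: l) = x :: pvCanon (s ++ [x]) l from by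
          rw [pvCanon_cons, if_neg hx], hfp]
      have hfp2 : pvFP cg (x :: pvCanon (s ++ [x]) l) =
          pvPreds cg x.1 ++ pvFP cg (pvCanon (s ++ [x]) l) := by simp [pvFP]
      rw [hfp2, pvCanon_append, pvCanon_append]
      congr 1
      apply ih
      intro y hy hys p hp
      rcases List.mem_append.mp hys with hys | hys
      · exact List.mem_append.mpr (Or.inl (h y (List.mem_cons_of_mem _ hy) hys p hp))
      · have hyx : y = x := List.mem_singleton.mp hys
        subst hyx
        exact pvCanon_absorb _ w p hp

-- ===== characterization of B's pass =====

lemma pvFixInner_eq (ps : List (String × String)) :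
    ∀ (r : List (String × String)) (c : Bool),
      pvFixInner (r, c) ps = (r ++ pvCanon r ps, c || decide (pvCanon r ps ≠ [])) := by
  induction ps with
  | nil => intro r c; simp [pvFixInner, pvCanon]
  | cons p ps ih =>
    intro r c
    show pvFixInner (if p ∈ r then (r, c) else (r ++ [p], true)) ps = _
    by_cases hp : p ∈ r
    · rw [if_pos hp, ih, show pvCanon r (p :: ps) = pvCanon r ps from by
        rw [pvCanon_cons]; rw [if_pos hp]]
    · rw [if_neg hp, ih, show pvCanon r (p :: ps) = p :: pvCanon (r ++ [p]) ps from by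
        rw [pvCanon_cons]; rw [if_neg hp]]
      simp [List.append_assoc]

lemma pvFixPass_eq (cg : List (String × List (String × String))) (snap : List (String × String)) :
    ∀ (r : List (String × String)) (c : Bool),
      pvFixPass cg snap (r, c) =
        (r ++ pvCanon r (pvFP cg snap), c || decide (pvCanon r (pvFP cg snap) ≠ [])) := by
  induction snap with
  | nil => intro r c; simp [pvFixPass, pvFP, pvCanon]
  | cons e snap ih =>
    intro r c
    show pvFixPass cg snap (pvFixInner (r, c) (pvPreds cg e.1)) = _
    rw [pvFixInner_eq, ih]
    have hfp : pvFP cg (e :: snap) = pvPreds cg e.1 ++ pvFP cg snap := by simp [pvFP]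
    rw [hfp, pvCanon_append, ← List.append_assoc, Prod.mk.injEq]
    refine ⟨rfl, ?_⟩
    rcases pvCanon r (pvPreds cg e.1) with _ | ⟨a, t⟩ <;> simp

-- ===== characterization of A's level =====

lemma pvFoldlAdd_eq (l : List (String × String)) :
    ∀ (s : List (String × String)), l.foldl PySem.Set.add s = s ++ pvCanon s l := by
  induction l with
  | nil => intro s; simp [pvCanon]
  | cons x l ih =>
    intro s
    show l.foldl PySem.Set.add (PySem.Set.add s x) = _
    by_cases hx : x ∈ s
    · rw [pvSetAdd_of_mem s x hx, ih,
        show pvCanon s (x :: l) = pvCanon s l from by rw [pvCanon_cons, if_pos hx]]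
    · rw [pvSetAdd_of_not_mem s x hx, ih,
        show pvCanon s (x :: l) = x :: pvCanon (s ++ [x]) l from by rw [pvCanon_cons, if_neg hx]]
      simp [List.append_assoc]

lemma pvStepC_eq (cg : List (String × List (String × String))) (f : List (String × String)) :
    ∀ (s v c : List (String × String)),
      pvStepC cg s v c f =
        ((pvCanon v f).foldl PySem.Set.add s, v ++ pvCanon v f, c ++ pvFP cg (pvCanon v f)) := by
  induction f with
  | nil => intro s v c; simp [pvStepC, pvCanon, pvFP]
  | cons x f ih =>
    intro s v c
    by_cases hx : x ∈ v
    · rw [show pvStepC cg s v c (x :: f) = pvStepC cg s v c f from by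
        conv_lhs => rw [pvStepC.eq_def]
        all_goals simp [hx], ih,
        show pvCanon v (x :: f) = pvCanon v f from by rw [pvCanon_cons]; rw [if_pos hx]]
    · rw [show pvStepC cg s v c (x :: f) =
          pvStepC cg (PySem.Set.add s x) (PySem.Set.add v x) (c ++ pvPreds cg x.1) f from by
        conv_lhs => rw [pvStepC.eq_def]
        all_goals simp [hx], ih,
        show pvCanon v (x :: f) = x :: pvCanon (v ++ [x]) f from by rw [pvCanon_cons]; rw [if_neg hx],
        pvSetAdd_of_not_mem v x hx]
      rw [Prod.mk.injEq, Prod.mk.injEq]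
      refine ⟨rfl, ?_, ?_⟩
      · rw [List.append_assoc]; rfl
      · simp [pvFP, List.append_assoc]

-- ===== A-side fuel machinery (unchanged from the standard layered analysis) =====

def pvQOKp (cg : List (String × List (String × String))) (q : List (String × String)) : Prop := pvQOK cg q

lemma pvStepC_unvis (cg : List (String × List (String × String))) :
    ∀ (f s v c : List (String × String)), pvQOK cg f →
      pvUnvis cg (pvStepC cg s v c f).2.1 ≤ pvUnvis cg v ∧
        (pvUnvis cg (pvStepC cg s v c f).2.1 = pvUnvis cg v → pvStepC cg s v c f = (s, v, c)) := by
  intro f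
  induction f with
  | nil => intro s v c _; exact ⟨le_rfl, fun _ => rfl⟩
  | cons x f ih =>
    intro s v c hq
    have hxE : x ∈ pvE cg := hq x List.mem_cons_self
    have hq' : pvQOK cg f := fun y hy => hq y (List.mem_cons_of_mem _ hy)
    by_cases hx : x ∈ v
    · rw [show pvStepC cg s v c (x :: f) = pvStepC cg s v c f from by
        conv_lhs => rw [pvStepC.eq_def]
        all_goals simp [hx]]
      exact ih s v c hq'
    · rw [show pvStepC cg s v c (x :: f) =
          pvStepC cg (PySem.Set.add s x) (PySem.Set.add v x) (c ++ pvPreds cg x.1) f from by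
        conv_lhs => rw [pvStepC.eq_def]
        all_goals simp [hx]]
      have hlt := pvUnvis_add_lt cg v x hxE hx
      have hle := (ih (PySem.Set.add s x) (PySem.Set.add v x) (c ++ pvPreds cg x.1) hq').1
      exact ⟨by omega, fun h => by omega⟩

lemma pvStepC_acc_sub (cg : List (String × List (String × String))) :
    ∀ (f s v c : List (String × String)), pvQOK cg c → pvQOK cg (pvStepC cg s v c f).2.2 := by
  intro f
  induction f with
  | nil => intro s v c hc; exact hc
  | cons x f ih =>
    intro s v c hc
    by_cases hx : x ∈ v
    · rw [show pvStepC cg s v c (x :: f) = pvStepC cg s v c f from by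
        conv_lhs => rw [pvStepC.eq_def]
        all_goals simp [hx]]
      exact ih s v c hc
    · rw [show pvStepC cg s v c (x :: f) =
          pvStepC cg (PySem.Set.add s x) (PySem.Set.add v x) (c ++ pvPreds cg x.1) f from by
        conv_lhs => rw [pvStepC.eq_def]
        all_goals simp [hx]]
      apply ih
      intro y hy
      rcases List.mem_append.mp hy with h | h
      · exact hc y h
      · exact pvPreds_sub cg x.1 y h

lemma pvUnion_ofList (c xs : List (String × String)) :
    PySem.Set.union (PySem.Set.ofList c) xs = PySem.Set.ofList (c ++ xs) := by
  simp [PySem.Set.union, PySem.Set.ofList_append]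

lemma pvLevelA_stepC (cg : List (String × List (String × String))) :
    ∀ (f s v c : List (String × String)),
      pvLevelA cg s v (PySem.Set.ofList c) f =
        ((pvStepC cg s v c f).1, (pvStepC cg s v c f).2.1, PySem.Set.ofList (pvStepC cg s v c f).2.2) := by
  intro f
  induction f with
  | nil => intro s v c; rfl
  | cons x f ih =>
    intro s v c
    by_cases hx : x ∈ v
    · rw [show pvLevelA cg s v (PySem.Set.ofList c) (x :: f) = pvLevelA cg s v (PySem.Set.ofList c) f from by
        conv_lhs => rw [pvLevelA.eq_def]
        all_goals simp [hx]]
      rw [show pvStepC cg s v c (x :: f) = pvStepC cg s v c f from by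
        conv_lhs => rw [pvStepC.eq_def]
        all_goals simp [hx]]
      exact ih s v c
    · rw [show pvLevelA cg s v (PySem.Set.ofList c) (x :: f) =
          pvLevelA cg (PySem.Set.add s x) (PySem.Set.add v x)
            (PySem.Set.union (PySem.Set.ofList c) (pvPreds cg x.1)) f from by
        conv_lhs => rw [pvLevelA.eq_def]
        all_goals simp [hx]]
      rw [show pvStepC cg s v c (x :: f) =
          pvStepC cg (PySem.Set.add s x) (PySem.Set.add v x) (c ++ pvPreds cg x.1) f from by
        conv_lhs => rw [pvStepC.eq_def]
        all_goals simp [hx]]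
      rw [pvUnion_ofList]
      exact ih _ _ _

lemma pvLoopA_nil (cg : List (String × List (String × String))) (k : Nat) (s v : List (String × String)) :
    pvLoopA cg k s v [] = s := by
  cases k <;> rfl

lemma pvLoopA_succ (cg : List (String × List (String × String))) (k : Nat)
    (s v f : List (String × String)) (hf : f ≠ []) :
    pvLoopA cg (k + 1) s v f =
      pvLoopA cg k (pvLevelA cg s v [] f).1 (pvLevelA cg s v [] f).2.1 (pvLevelA cg s v [] f).2.2 := by
  rcases hE : pvLevelA cg s v [] f with ⟨s', v', n⟩
  conv_lhs => rw [pvLoopA.eq_def]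
  simp [hf, hE]

lemma pvLevelA_nilc (cg : List (String × List (String × String))) (s v f : List (String × String)) :
    pvLevelA cg s v [] f =
      ((pvStepC cg s v [] f).1, (pvStepC cg s v [] f).2.1, PySem.Set.ofList (pvStepC cg s v [] f).2.2) :=
  pvLevelA_stepC cg f s v []

lemma pvStepC_lt (cg : List (String × List (String × String))) (s v f : List (String × String))
    (hf : pvQOK cg f) (hne : (pvStepC cg s v [] f).2.2 ≠ []) :
    pvUnvis cg (pvStepC cg s v [] f).2.1 < pvUnvis cg v := by
  have huv := pvStepC_unvis cg f s v [] hf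
  rcases Nat.lt_or_ge (pvUnvis cg (pvStepC cg s v [] f).2.1) (pvUnvis cg v) with h | h
  · exact h
  · exfalso
    have heq : pvUnvis cg (pvStepC cg s v [] f).2.1 = pvUnvis cg v := le_antisymm huv.1 h
    exact hne (congrArg (fun t => t.2.2) (huv.2 heq))

lemma pvStepC_QOK (cg : List (String × List (String × String))) (s v f : List (String × String)) :
    pvQOK cg (PySem.Set.ofList (pvStepC cg s v [] f).2.2) := by
  intro y hy
  rw [PySem.Set.mem_ofList] at hy
  exact pvStepC_acc_sub cg f s v [] (fun z hz => absurd hz List.not_mem_nil) y hy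

lemma pvLoopA_mono (cg : List (String × List (String × String))) :
    ∀ (k : Nat) (s v f : List (String × String)), pvQOK cg f → pvUnvis cg v + 2 ≤ k →
      pvLoopA cg k s v f = pvLoopA cg (k + 1) s v f := by
  intro k
  induction k with
  | zero => intro s v f _ hb; exact absurd hb (by omega)
  | succ k ih =>
    intro s v f hf hb
    by_cases hfe : f = []
    · subst hfe; rw [pvLoopA_nil, pvLoopA_nil]
    · rw [pvLoopA_succ cg k s v f hfe, pvLoopA_succ cg (k + 1) s v f hfe,
        pvLevelA_nilc cg s v f]
      dsimp only
      by_cases hn : PySem.Set.ofList (pvStepC cg s v [] f).2.2 = []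
      · rw [hn, pvLoopA_nil, pvLoopA_nil]
      · have hne : (pvStepC cg s v [] f).2.2 ≠ [] := fun h => hn (by rw [h]; rfl)
        have hlt := pvStepC_lt cg s v f hf hne
        exact ih _ _ _ (pvStepC_QOK cg s v f) (by omega)

lemma pvLoopA_irrel (cg : List (String × List (String × String))) (k : Nat) (s v f : List (String × String))
    (hf : pvQOK cg f) (hk : pvUnvis cg v + 2 ≤ k) :
    pvLoopA cg k s v f = pvRunA cg s v f := by
  obtain ⟨d, rfl⟩ : ∃ d, k = (pvUnvis cg v + 2) + d := ⟨k - (pvUnvis cg v + 2), by omega⟩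
  clear hk
  induction d with
  | zero => rfl
  | succ d ih =>
    have h := pvLoopA_mono cg ((pvUnvis cg v + 2) + d) s v f hf (by omega)
    rw [show (pvUnvis cg v + 2) + (d + 1) = ((pvUnvis cg v + 2) + d) + 1 from rfl, ← h]
    exact ih

lemma pvRunA_step (cg : List (String × List (String × String))) (s v f : List (String × String))
    (hne : f ≠ []) (hf : pvQOK cg f) :
    pvRunA cg s v f =
      (if (pvLevelA cg s v [] f).2.2 = [] then (pvLevelA cg s v [] f).1
       else pvRunA cg (pvLevelA cg s v [] f).1 (pvLevelA cg s v [] f).2.1 (pvLevelA cg s v [] f).2.2) := by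
  conv_lhs => unfold pvRunA
  rw [show pvUnvis cg v + 2 = (pvUnvis cg v + 1) + 1 from rfl,
    pvLoopA_succ cg (pvUnvis cg v + 1) s v f hne]
  rw [pvLevelA_nilc cg s v f]
  dsimp only
  by_cases hn : PySem.Set.ofList (pvStepC cg s v [] f).2.2 = []
  · rw [if_pos hn, hn, pvLoopA_nil]
  · rw [if_neg hn]
    have hne2 : (pvStepC cg s v [] f).2.2 ≠ [] := fun h => hn (by rw [h]; rfl)
    have hlt := pvStepC_lt cg s v f hf hne2
    exact pvLoopA_irrel cg _ _ _ _ (pvStepC_QOK cg s v f) (by omega)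

-- ===== B-side fuel machinery =====

lemma pvFixLoop_succ (cg : List (String × List (String × String))) (k : Nat) (r : List (String × String)) :
    pvFixLoop cg (k + 1) r =
      (if (pvFixPass cg r (r, false)).2 then pvFixLoop cg k (pvFixPass cg r (r, false)).1
       else (pvFixPass cg r (r, false)).1) := rfl

lemma pvCanonFP_lt (cg : List (String × List (String × String))) (r : List (String × String))
    (hne : pvCanon r (pvFP cg r) ≠ []) :
    pvUnvis cg (r ++ pvCanon r (pvFP cg r)) < pvUnvis cg r := by
  rcases hC : pvCanon r (pvFP cg r) with _ | ⟨x, C'⟩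
  · exact absurd hC hne
  · have hx : x ∈ pvCanon r (pvFP cg r) := by rw [hC]; exact List.mem_cons_self
    obtain ⟨hx1, hx2⟩ := (pvCanon_mem_iff _ _ _).mp hx
    rw [← hC]
    exact pvUnvis_append_lt cg r _ x hx (pvFP_sub cg r x hx1) hx2

lemma pvFixLoop_mono (cg : List (String × List (String × String))) :
    ∀ (k : Nat) (r : List (String × String)), pvUnvis cg r + 1 ≤ k →
      pvFixLoop cg k r = pvFixLoop cg (k + 1) r := by
  intro k
  induction k with
  | zero => intro r hb; exact absurd hb (by omega)
  | succ k ih =>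
    intro r hb
    rw [pvFixLoop_succ, pvFixLoop_succ, pvFixPass_eq]
    dsimp only
    by_cases hn : pvCanon r (pvFP cg r) = []
    · simp [hn]
    · rw [if_pos (by simp [hn]), if_pos (by simp [hn])]
      have hlt := pvCanonFP_lt cg r hn
      exact ih _ (by omega)

lemma pvFixLoop_irrel (cg : List (String × List (String × String))) (k : Nat) (r : List (String × String))
    (hk : pvUnvis cg r + 1 ≤ k) :
    pvFixLoop cg k r = pvFixRun cg r := by
  obtain ⟨d, rfl⟩ : ∃ d, k = (pvUnvis cg r + 1) + d := ⟨k - (pvUnvis cg r + 1), by omega⟩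
  clear hk
  induction d with
  | zero => rfl
  | succ d ih =>
    have h := pvFixLoop_mono cg ((pvUnvis cg r + 1) + d) r (by omega)
    rw [show (pvUnvis cg r + 1) + (d + 1) = ((pvUnvis cg r + 1) + d) + 1 from rfl, ← h]
    exact ih

lemma pvFixRun_step (cg : List (String × List (String × String))) (r : List (String × String)) :
    pvFixRun cg r =
      (if pvCanon r (pvFP cg r) = [] then r
       else pvFixRun cg (r ++ pvCanon r (pvFP cg r))) := by
  conv_lhs => unfold pvFixRun
  rw [pvFixLoop_succ, pvFixPass_eq]
  dsimp only
  by_cases hn : pvCanon r (pvFP cg r) = []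
  · simp [hn]
  · rw [if_pos (by simp [hn]), if_neg hn]
    have hlt := pvCanonFP_lt cg r hn
    exact pvFixLoop_irrel cg _ _ (by omega)

lemma pvFixLoop_nodup (cg : List (String × List (String × String))) :
    ∀ (k : Nat) (r : List (String × String)), r.Nodup → (pvFixLoop cg k r).Nodup := by
  intro k
  induction k with
  | zero => intro r h; exact h
  | succ k ih =>
    intro r h
    rw [pvFixLoop_succ, pvFixPass_eq]
    dsimp only
    have hnd : (r ++ pvCanon r (pvFP cg r)).Nodup := by
      rw [List.nodup_append]
      refine ⟨h, pvCanon_nodup _ _, ?_⟩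
      intro y hy z hz hyz
      exact ((pvCanon_mem_iff (pvFP cg r) r z).mp hz).2 (hyz ▸ hy)
    split
    · exact ih _ hnd
    · exact hnd

lemma pvOfList_nodup_id (l : List (String × String)) (h : l.Nodup) : PySem.Set.ofList l = l := by
  induction l with
  | nil => rfl
  | cons x l ih =>
    rw [List.nodup_cons] at h
    rw [PySem.Set.ofList_cons, ih h.2, pvDiscard_eq_filter]
    congr 1
    apply List.filter_eq_self.mpr
    intro y hy
    simp only [bne_iff_ne, ne_eq]
    intro hyx
    exact h.1 (hyx ▸ hy)

-- ===== the tail: once every frontier edge is already in the slice, A adds nothing more =====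

lemma pvTail2 (cg : List (String × List (String × String))) (s v f : List (String × String))
    (hf : pvQOK cg f) (hfv : ∀ y ∈ f, y ∈ v) :
    pvRunA cg s v f = s := by
  by_cases hfe : f = []
  · subst hfe; exact pvLoopA_nil cg _ s v
  · rw [pvRunA_step cg s v f hfe hf, pvLevelA_nilc cg s v f, pvStepC_eq]
    dsimp only
    have hCv : pvCanon v f = [] := (pvCanon_eq_nil_iff f v).mpr hfv
    rw [hCv]
    simp [pvFP, PySem.Set.ofList]

lemma pvTail (cg : List (String × List (String × String))) (s v f : List (String × String))
    (e0 : String × String)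
    (hf : pvQOK cg f) (hfs : ∀ y ∈ f, y ∈ s) (hvs : ∀ y ∈ v, y ∈ s)
    (hsv : ∀ y ∈ s, y ∈ v ∨ y = e0) (hp : ∀ y ∈ pvPreds cg e0.1, y ∈ s) :
    pvRunA cg s v f = s := by
  by_cases hfe : f = []
  · subst hfe; exact pvLoopA_nil cg _ s v
  · rw [pvRunA_step cg s v f hfe hf, pvLevelA_nilc cg s v f, pvStepC_eq]
    dsimp only
    have hCs : pvCanon s f = [] := (pvCanon_eq_nil_iff f s).mpr hfs
    have hS : (pvCanon v f).foldl PySem.Set.add s = s := by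
      rw [pvFoldlAdd_eq, pvCanon_sub _ _ _ hvs, hCs, List.append_nil]
    rw [hS]
    -- the only possibly-new-to-v element of f is e0
    have hCvsub : ∀ y ∈ pvCanon v f, y = e0 := by
      intro y hy
      obtain ⟨hy1, hy2⟩ := (pvCanon_mem_iff _ _ _).mp hy
      rcases hsv y (hfs y hy1) with h | h
      · exact absurd h hy2
      · exact h
    rcases hCv : pvCanon v f with _ | ⟨x, C'⟩
    · simp [pvFP, PySem.Set.ofList]
    · have hx : x = e0 := hCvsub x (by rw [hCv]; exact List.mem_cons_self)
      have hC' : C' = [] := by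
        rcases C' with _ | ⟨y, C''⟩
        · rfl
        · exfalso
          have hnd := pvCanon_nodup f v
          rw [hCv] at hnd
          have hy : y = e0 := hCvsub y (by rw [hCv]; exact List.mem_cons_of_mem _ List.mem_cons_self)
          rw [List.nodup_cons] at hnd
          exact hnd.1 (by rw [hx, ← hy]; exact List.mem_cons_self)
      subst hC'
      -- next frontier is set(preds(e0)) ⊆ s; one more level with e0 now visited finishes
      have hfp : pvFP cg [x] = pvPreds cg x.1 := by simp [pvFP]
      rw [List.nil_append, hfp]
      by_cases hn : PySem.Set.ofList (pvPreds cg x.1) = []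
      · rw [if_pos hn]
      · rw [if_neg hn]
        apply pvTail2
        · intro y hy
          rw [PySem.Set.mem_ofList] at hy
          exact pvPreds_sub cg x.1 y hy
        · intro y hy
          rw [PySem.Set.mem_ofList] at hy
          rcases hsv y (by rw [hx] at hy; exact hp y hy) with h | h
          · exact List.mem_append.mpr (Or.inl h)
          · exact List.mem_append.mpr (Or.inr (by rw [h, ← hx]; exact (List.mem_singleton.mpr rfl)))

-- ===== the main simulation: A's levels against B's rescan passes =====

lemma pvMain (cg : List (String × List (String × String))) :
    ∀ (u : Nat) (s v f : List (String × String)) (e0 : String × String),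
      pvUnvis cg s ≤ u →
      pvQOK cg f →
      (∀ y ∈ v, y ∈ s) →
      (∀ y ∈ s, y ∈ v ∨ y = e0) →
      (∀ y ∈ pvPreds cg e0.1, y ∈ s ∨ y ∈ f) →
      pvCanon s (pvFP cg s) = pvCanon s f →
      pvRunA cg s v f = pvFixRun cg s := by
  intro u
  induction u using Nat.strong_induction_on with
  | _ u ih =>
    intro s v f e0 hu hf hvs hsv hp hH4
    by_cases hC : pvCanon s f = []
    · -- no new edges: B's pass adds nothing and A's remaining levels keep s fixed
      have hfix : pvFixRun cg s = s := by
        rw [pvFixRun_step, if_pos (by rw [hH4, hC])]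
      rw [hfix]
      have hfs : ∀ y ∈ f, y ∈ s := (pvCanon_eq_nil_iff f s).mp hC
      exact pvTail cg s v f e0 hf hfs hvs hsv
        (fun y hy => by rcases hp y hy with h | h; exacts [h, hfs y h])
    · -- new edges C appear: both sides step to the slice s ++ C
      have hfe : f ≠ [] := by
        rintro rfl
        exact hC rfl
      -- identify A's level components
      set Cv := pvCanon v f with hCvdef
      set C := pvCanon s f with hCdef
      have hCsub : C = pvCanon s Cv := (pvCanon_sub f v s hvs).symm
      have hScomp : (pvCanon v f).foldl PySem.Set.add s = s ++ C := by
        rw [pvFoldlAdd_eq, pvCanon_sub _ _ _ hvs]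
      set s' := s ++ C with hs'def
      set v' := v ++ Cv with hv'def
      set f' := PySem.Set.ofList (pvFP cg Cv) with hf'def
      have hstep : pvRunA cg s v f = pvRunA cg s' v' f' := by
        rw [pvRunA_step cg s v f hfe hf, pvLevelA_nilc cg s v f, pvStepC_eq]
        dsimp only
        rw [hScomp, List.nil_append]
        by_cases hnil : PySem.Set.ofList (pvFP cg (pvCanon v f)) = []
        · rw [if_pos hnil]
          have hfnil : f' = [] := by rw [hf'def, hCvdef]; exact hnil
          rw [hfnil]
          unfold pvRunA
          rw [pvLoopA_nil]
        · rw [if_neg hnil]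
      -- facts about the new state
      have hCmem : ∀ y ∈ C, y ∈ f ∧ y ∉ s := fun y hy => (pvCanon_mem_iff _ _ _).mp hy
      have hlt : pvUnvis cg s' < pvUnvis cg s := by
        rcases hC2 : C with _ | ⟨x, C'⟩
        · exact absurd hC2 hC
        · have hx : x ∈ C := by rw [hC2]; exact List.mem_cons_self
          obtain ⟨hx1, hx2⟩ := hCmem x hx
          exact pvUnvis_append_lt cg s C x hx (hf x hx1) hx2
      have hfmem : ∀ y ∈ f, y ∈ s' := fun y hy => pvCanon_absorb f s y hy
      have hQf' : pvQOK cg f' := by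
        intro y hy
        rw [hf'def, PySem.Set.mem_ofList] at hy
        exact pvFP_sub cg Cv y hy
      have hvs' : ∀ y ∈ v', y ∈ s' := by
        intro y hy
        rcases List.mem_append.mp hy with h | h
        · exact List.mem_append.mpr (Or.inl (hvs y h))
        · exact hfmem y ((pvCanon_mem_iff _ _ _).mp h).1
      have hsv' : ∀ y ∈ s', y ∈ v' ∨ y = e0 := by
        intro y hy
        rcases List.mem_append.mp hy with h | h
        · rcases hsv y h with h2 | h2
          · exact Or.inl (List.mem_append.mpr (Or.inl h2))
          · exact Or.inr h2
        · left
          apply List.mem_append.mpr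
          right
          obtain ⟨h1, h2⟩ := hCmem y h
          exact (pvCanon_mem_iff _ _ _).mpr ⟨h1, fun hv => h2 (hvs y hv)⟩
      have hpe0 : ∀ y ∈ pvPreds cg e0.1, y ∈ s' := by
        intro y hy
        rcases hp y hy with h | h
        · exact List.mem_append.mpr (Or.inl h)
        · exact hfmem y h
      have hH4' : pvCanon s' (pvFP cg s') = pvCanon s' f' := by
        have hfp : pvFP cg s' = pvFP cg s ++ pvFP cg C := by simp [pvFP, hs'def]
        have hFPs : ∀ y ∈ pvFP cg s, y ∈ s' := by
          intro y hy
          have := pvCanon_absorb (pvFP cg s) s y hy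
          rw [hH4] at this
          exact this
        rw [hfp, pvCanon_dropPrefix _ _ _ hFPs, hf'def, pvCanon_ofList, hCsub]
        apply pvCanon_fp_drop
        intro y hy hys p hpp
        rcases hsv y hys with h | h
        · exact absurd h ((pvCanon_mem_iff f v y).mp hy).2
        · exact hpe0 p (by rw [← h]; exact hpp)
      have hfix : pvFixRun cg s = pvFixRun cg s' := by
        rw [pvFixRun_step, hH4, if_neg hC]
      rw [hstep, hfix]
      exact ih (pvUnvis cg s') (by omega) s' v' f' e0 le_rfl hQf' hvs' hsv' (fun y hy => Or.inl (hpe0 y hy)) hH4'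

-- ===== VERDICT (by name: the statement is the Claim_ definition above) =====
theorem compute_slice_spec : Claim_equal_compute_slice := by
  intro cg edge _hdom
  show compute_slice cg edge = compute_slice_alt cg edge
  have hempty : PySem.Set.add PySem.Set.empty edge = [edge] := rfl
  have hqf : pvQOK cg (pvPreds cg edge.1) := pvPreds_sub cg edge.1
  have hA : compute_slice cg edge = pvRunA cg [edge] PySem.Set.empty (pvPreds cg edge.1) := by
    unfold compute_slice pvRunA
    rw [hempty]
  have hH4 : pvCanon [edge] (pvFP cg [edge]) = pvCanon [edge] (pvPreds cg edge.1) := by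
    simp [pvFP]
  have hmain := pvMain cg (pvUnvis cg [edge]) [edge] PySem.Set.empty (pvPreds cg edge.1) edge
    le_rfl hqf (fun y hy => absurd hy List.not_mem_nil)
    (fun y hy => Or.inr (List.mem_singleton.mp hy))
    (fun y hy => Or.inr hy) hH4
  have hB : compute_slice_alt cg edge = pvFixRun cg [edge] := by
    unfold compute_slice_alt
    rw [pvFixLoop_irrel cg _ [edge]
      (by
        have := pvUnvis_mono cg PySem.Set.empty [edge] (fun y hy => absurd hy List.not_mem_nil)
        omega)]
    exact pvOfList_nodup_id _ (by
      apply pvFixLoop_nodup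
      simp)
  rw [hA, hB, hmain]
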